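-- pv_equiv track=rewrite | github.com/Nomoos/PrismQ | scripts/add_module/path_utils.py | derive_module_path
-- ===== SOURCE A (Python) =====
-- from typing import Tuple
--
-- def derive_module_path(repo_name: str) -> Tuple[str, str]:
--     """
--     Derive module path from repository name.
--
--     Converts repository name like "PrismQ.IdeaInspiration.Sources"
--     to module name "IdeaInspiration.Sources" and path "src/IdeaInspiration/src/Sources"
--
--     Args:
--         repo_name: Repository name (e.g., "PrismQ.ModuleName")
--
--     Returns:
--         Tuple of (module_name, module_path)
--     """
--     # Remove "PrismQ." prefix if present
--     module_full_name = repo_name.replace('PrismQ.', '', 1)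
--
--     # Split by dots
--     components = module_full_name.split('.')
--
--     if len(components) == 1:
--         # Single component: src/Component
--         return components[0], f"src/{components[0]}"
--     else:
--         # Multiple components: src/First/src/Second/src/Third...
--         path_parts = [f"src/{components[0]}"]
--         for component in components[1:]:
--             path_parts.append(f"src/{component}")
--         module_path = '/'.join(path_parts)
--         return module_full_name, module_path
-- ===== SOURCE B (Python) =====
-- def derive_module_path(repo_name):
--     module_full_name = repo_name.replace('PrismQ.', '', 1)
--     return module_full_name, 'src/' + module_full_name.replace('.', '/src/')
-- ===== Notes on version B (the rewrite author's own statement) =====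
-- stated objective: simpler
-- what changed: B strips the repo prefix once and computes the whole path by a single replace of each dot with the nested-source separator, removing A's split into components, the length-based branch and the join loop.
import Mathlib
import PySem

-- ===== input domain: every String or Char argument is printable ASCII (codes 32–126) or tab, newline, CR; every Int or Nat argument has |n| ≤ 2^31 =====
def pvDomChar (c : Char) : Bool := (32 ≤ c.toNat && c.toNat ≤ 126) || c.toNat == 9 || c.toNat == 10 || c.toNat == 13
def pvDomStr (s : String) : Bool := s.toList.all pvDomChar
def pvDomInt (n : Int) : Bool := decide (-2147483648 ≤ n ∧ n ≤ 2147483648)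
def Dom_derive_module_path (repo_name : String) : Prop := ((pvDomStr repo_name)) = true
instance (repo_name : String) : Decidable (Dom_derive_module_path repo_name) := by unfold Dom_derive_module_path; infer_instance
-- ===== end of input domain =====

-- B changes A's split/branch/join-loop construction into a closed-form rewrite
-- ('src/' + name.replace('.', '/src/')); objective: simpler, same cost.

-- shared helper: Python's s.replace(old, new, 1) (exact for the nonempty literal
-- old = "PrismQ." both programs pass; PySem has no count-limited replace)
def pyReplaceOnce (old new : List Char) : List Char → List Char
  | [] => []
  | c :: t =>
      if old.isPrefixOf (c :: t) then new ++ (c :: t).drop old.length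
      else c :: pyReplaceOnce old new t

-- ===== PORT A =====
def derive_module_path (repo_name : String) : String × String :=
  let module_full_name := pyReplaceOnce "PrismQ.".toList [] repo_name.toList
  let components := PySem.Chars.splitOn module_full_name ['.']
  if components.length = 1 then
    (String.ofList (PySem.List.pyGetD components 0 []),
     String.ofList ("src/".toList ++ PySem.List.pyGetD components 0 []))
  else
    let path_parts := (PySem.List.slice components (some 1) none).foldl
        (fun acc comp => acc ++ ["src/".toList ++ comp])
        ["src/".toList ++ PySem.List.pyGetD components 0 []]
    (String.ofList module_full_name, String.ofList (PySem.Chars.join ['/'] path_parts))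

-- ===== PORT B =====
def derive_module_path_alt (repo_name : String) : String × String :=
  let module_full_name := pyReplaceOnce "PrismQ.".toList [] repo_name.toList
  (String.ofList module_full_name,
   String.ofList ("src/".toList ++ PySem.Chars.replace module_full_name ['.'] "/src/".toList))

-- ===== PRECONDITION & SPEC =====
def Spec_derive_module_path (repo_name : String) (out : String × String) : Prop := out = derive_module_path_alt repo_name
instance (repo_name : String) (out : String × String) : Decidable (Spec_derive_module_path repo_name out) := by unfold Spec_derive_module_path; infer_instance

-- ===== CLAIM (what is proved, stated in full; the proofs are below) =====
def Claim_equal_derive_module_path : Prop := ∀ (repo_name : String), Dom_derive_module_path repo_name → Spec_derive_module_path repo_name (derive_module_path repo_name)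

-- ===== LEMMAS AND PROOFS =====

-- spec-side split on the single separator '.'
def spSplit : List Char → List (List Char)
  | [] => [[]]
  | c :: t =>
      if c = '.' then [] :: spSplit t
      else match spSplit t with
        | [] => [[c]]
        | p :: ps => (c :: p) :: ps

-- spec-side replace-all of '.' by new
def spRep (new : List Char) : List Char → List Char
  | [] => []
  | c :: t => if c = '.' then new ++ spRep new t else c :: spRep new t

def headCons (pre : List Char) : List (List Char) → List (List Char)
  | [] => [pre]
  | p :: ps => (pre ++ p) :: ps

lemma spSplit_ne_nil (l : List Char) : spSplit l ≠ [] := by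
  cases l with
  | nil => simp [spSplit]
  | cons c t =>
      simp only [spSplit]
      split
      · simp
      · split <;> simp

lemma isPrefixOf_dot (c : Char) (t : List Char) :
    (['.'] : List Char).isPrefixOf (c :: t) = (c == '.') := by
  simp only [List.isPrefixOf, Bool.and_true]
  simp [eq_comm]

lemma splitOn_go_eq (fuel : Nat) :
    ∀ (l cur : List Char) (acc : List (List Char)), l.length < fuel →
      PySem.Chars.splitOn.go ['.'] fuel l cur acc = acc.reverse ++ headCons cur.reverse (spSplit l) := by
  induction fuel with
  | zero => intro l cur acc h; omega
  | succ f ih =>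
      intro l cur acc h
      cases l with
      | nil => simp [PySem.Chars.splitOn.go, spSplit, headCons]
      | cons c t =>
          simp only [PySem.Chars.splitOn.go, isPrefixOf_dot]
          by_cases hc : c = '.'
          · rw [if_pos (by simp [hc])]
            simp only [List.length_cons, List.length_nil, List.drop_succ_cons, List.drop_zero]
            rw [ih t [] (cur.reverse :: acc) (by simpa using Nat.lt_of_succ_lt_succ h)]
            simp only [spSplit, if_pos hc]
            rcases hsp : spSplit t with _ | ⟨p, ps⟩
            · exact absurd hsp (spSplit_ne_nil t)
            · simp [headCons]
          · rw [if_neg (by simp [hc])]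
            rw [ih t (c :: cur) acc (by simpa using Nat.lt_of_succ_lt_succ h)]
            simp only [spSplit, if_neg hc]
            rcases hsp : spSplit t with _ | ⟨p, ps⟩
            · exact absurd hsp (spSplit_ne_nil t)
            · simp [headCons]

lemma splitOn_eq_spSplit (l : List Char) :
    PySem.Chars.splitOn l ['.'] = spSplit l := by
  unfold PySem.Chars.splitOn
  rw [splitOn_go_eq (l.length + 1) l [] [] (by omega)]
  rcases hsp : spSplit l with _ | ⟨p, ps⟩
  · exact absurd hsp (spSplit_ne_nil l)
  · simp [headCons]

lemma replace_go_eq (new : List Char) (fuel : Nat) :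
    ∀ (l acc : List Char), l.length ≤ fuel →
      PySem.Chars.replace.go ['.'] new fuel l acc = acc.reverse ++ spRep new l := by
  induction fuel with
  | zero =>
      intro l acc h
      have : l = [] := List.eq_nil_of_length_eq_zero (Nat.le_zero.mp h)
      subst this
      simp [PySem.Chars.replace.go, spRep]
  | succ f ih =>
      intro l acc h
      cases l with
      | nil => simp [PySem.Chars.replace.go, spRep]
      | cons c t =>
          simp only [PySem.Chars.replace.go, isPrefixOf_dot]
          by_cases hc : c = '.'
          · rw [if_pos (by simp [hc])]
            simp only [List.length_cons, List.length_nil, List.drop_succ_cons, List.drop_zero]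
            rw [ih t (new.reverse ++ acc) (by simpa using Nat.le_of_succ_le_succ h)]
            simp [spRep, hc]
          · rw [if_neg (by simp [hc])]
            rw [ih t (c :: acc) (by simpa using Nat.le_of_succ_le_succ h)]
            simp [spRep, if_neg hc]

lemma replace_eq_spRep (l new : List Char) :
    PySem.Chars.replace l ['.'] new = spRep new l := by
  unfold PySem.Chars.replace
  rw [if_neg (by simp)]
  rw [replace_go_eq new l.length l [] le_rfl]
  simp

lemma intercalate_cons₂ (sep x y : List Char) (zs : List (List Char)) :
    List.intercalate sep (x :: y :: zs) = x ++ sep ++ List.intercalate sep (y :: zs) := by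
  simp [List.intercalate, List.intersperse]

lemma intercalate_cons_head (sep : List Char) (c : Char) (p : List Char) (ps : List (List Char)) :
    List.intercalate sep ((c :: p) :: ps) = c :: List.intercalate sep (p :: ps) := by
  cases ps with
  | nil => simp [List.intercalate]
  | cons q qs => rw [intercalate_cons₂, intercalate_cons₂]; simp

lemma intercalate_spSplit (new l : List Char) :
    List.intercalate new (spSplit l) = spRep new l := by
  induction l with
  | nil => simp [spSplit, spRep, List.intercalate]
  | cons c t ih =>
      by_cases hc : c = '.'
      · simp only [spSplit, if_pos hc, spRep]
        rcases hsp : spSplit t with _ | ⟨p, ps⟩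
        · exact absurd hsp (spSplit_ne_nil t)
        · rw [intercalate_cons₂]
          rw [hsp] at ih
          simp [ih]
      · simp only [spSplit, if_neg hc, spRep]
        rcases hsp : spSplit t with _ | ⟨p, ps⟩
        · exact absurd hsp (spSplit_ne_nil t)
        · rw [intercalate_cons_head]
          rw [hsp] at ih
          simp [ih]

lemma spRep_dot (l : List Char) : spRep ['.'] l = l := by
  induction l with
  | nil => rfl
  | cons c t ih =>
      by_cases hc : c = '.'
      · simp [spRep, ih, hc]
      · simp [spRep, if_neg hc, ih]

lemma intercalate_map_append (pre sep p : List Char) (ps : List (List Char)) :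
    List.intercalate sep ((p :: ps).map (fun x => pre ++ x))
      = pre ++ List.intercalate (sep ++ pre) (p :: ps) := by
  induction ps generalizing p with
  | nil => simp [List.intercalate]
  | cons q qs ih =>
      simp only [List.map_cons] at ih ⊢
      rw [intercalate_cons₂, intercalate_cons₂, ih]
      simp

-- ===== VERDICT (by name: the statement is the Claim_ definition above) =====
theorem derive_module_path_spec : Claim_equal_derive_module_path := by
  intro repo_name _
  unfold Spec_derive_module_path
  simp only [derive_module_path, derive_module_path_alt]
  generalize pyReplaceOnce "PrismQ.".toList [] repo_name.toList = l
  rw [splitOn_eq_spSplit, replace_eq_spRep]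
  rcases hsp : spSplit l with _ | ⟨p, ps⟩
  · exact absurd hsp (spSplit_ne_nil l)
  cases ps with
  | nil =>
      have hpl : p = l := by
        have := intercalate_spSplit ['.'] l
        rw [hsp, spRep_dot] at this
        simpa [List.intercalate] using this
      have hrep := intercalate_spSplit "/src/".toList l
      rw [hsp] at hrep
      simp [List.intercalate] at hrep
      simp [PySem.List.pyGetD_ofNat', hpl, ← hrep]
  | cons q qs =>
      rw [if_neg (by simp)]
      have hslice : PySem.List.slice (p :: q :: qs) (some 1) none = q :: qs := by
        rw [PySem.List.slice_from (p :: q :: qs) (a := 1) (by norm_num)]; rfl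
      rw [hslice]
      rw [PySem.List.foldl_append_singleton_eq_map]
      have hmap : ["src/".toList ++ PySem.List.pyGetD (p :: q :: qs) 0 []] ++
            (q :: qs).map (fun comp => "src/".toList ++ comp)
          = ((p :: q :: qs).map (fun x => "src/".toList ++ x)) := by
        simp [PySem.List.pyGetD_ofNat']
      rw [hmap]
      unfold PySem.Chars.join
      rw [intercalate_map_append]
      rw [← hsp, intercalate_spSplit]
      constructor
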